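-- pv_equiv track=rewrite | github.com/AnirudhA124/extension-api | app.py | post_process_blocks
-- ===== SOURCE A (Python) =====
-- def post_process_blocks(blocks):
--     """Further refine blocks to ensure each task is truly separate"""
--     refined_blocks = []
--
--     for block in blocks:
--         # Check if this block contains multiple distinct tasks
--         lines = block.split('\n')
--         sub_blocks = []
--         current_sub_block = []
--
--         for line in lines:
--             stripped = line.strip()
--
--             # Split on significant transitions
--             if (stripped.startswith('#') and
--                 any(keyword in stripped.lower() for keyword in ['example', 'usage', 'test', 'check']) and
--                 current_sub_block):
--
--                 # Save current sub-block
--                 sub_block_text = '\n'.join(current_sub_block).strip()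
--                 if sub_block_text:
--                     sub_blocks.append(sub_block_text)
--                 current_sub_block = [line]
--
--             elif (stripped.startswith('if ') and
--                   'is_prime' in stripped and
--                   current_sub_block and
--                   not any('if ' in cb_line for cb_line in current_sub_block)):
--
--                 # This looks like a separate example/test
--                 sub_block_text = '\n'.join(current_sub_block).strip()
--                 if sub_block_text:
--                     sub_blocks.append(sub_block_text)
--                 current_sub_block = [line]
--
--             else:
--                 current_sub_block.append(line)
--
--         # Add the final sub-block
--         if current_sub_block:
--             sub_block_text = '\n'.join(current_sub_block).strip()
--             if sub_block_text:
--                 sub_blocks.append(sub_block_text)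
--
--         # Add sub-blocks or original block if no splitting occurred
--         if len(sub_blocks) > 1:
--             refined_blocks.extend(sub_blocks)
--         else:
--             refined_blocks.append(block)
--
--     return [b for b in refined_blocks if b.strip()]
-- ===== SOURCE B (Python) =====
-- def post_process_blocks(blocks):
--     """Two-pass refinement: first compute split start-indices per block, then slice."""
--     refined_blocks = []
--     for block in blocks:
--         lines = block.split('\n')
--         n = len(lines)
--         # pass 1: indices where a new sub-block starts
--         splits = [0]
--         seg_len = 0
--         has_if = False
--         for i, line in enumerate(lines):
--             stripped = line.strip()
--             if seg_len > 0 and (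
--                 (stripped.startswith('#') and
--                  any(k in stripped.lower() for k in ['example', 'usage', 'test', 'check']))
--                 or (stripped.startswith('if ') and 'is_prime' in stripped and not has_if)):
--                 splits.append(i)
--                 seg_len = 1
--                 has_if = 'if ' in line
--             else:
--                 seg_len += 1
--                 has_if = has_if or ('if ' in line)
--         # pass 2: materialise the segments
--         sub_blocks = []
--         for s, e in zip(splits, splits[1:] + [n]):
--             text = '\n'.join(lines[s:e]).strip()
--             if text:
--                 sub_blocks.append(text)
--         if len(sub_blocks) > 1:
--             refined_blocks.extend(sub_blocks)
--         else:
--             refined_blocks.append(block)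
--     return [b for b in refined_blocks if b.strip()]
-- ===== Notes on version B (the rewrite author's own statement) =====
-- stated objective: alternative
-- what changed: B replaces A's accumulate-lines-into-current_sub_block loop by two passes per block: one pass over enumerated lines computing split start-indices (with a maintained has-'if ' flag and segment length instead of the accumulated line list), then a slicing pass that joins lines[s:e] for consecutive index pairs.
import Mathlib
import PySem

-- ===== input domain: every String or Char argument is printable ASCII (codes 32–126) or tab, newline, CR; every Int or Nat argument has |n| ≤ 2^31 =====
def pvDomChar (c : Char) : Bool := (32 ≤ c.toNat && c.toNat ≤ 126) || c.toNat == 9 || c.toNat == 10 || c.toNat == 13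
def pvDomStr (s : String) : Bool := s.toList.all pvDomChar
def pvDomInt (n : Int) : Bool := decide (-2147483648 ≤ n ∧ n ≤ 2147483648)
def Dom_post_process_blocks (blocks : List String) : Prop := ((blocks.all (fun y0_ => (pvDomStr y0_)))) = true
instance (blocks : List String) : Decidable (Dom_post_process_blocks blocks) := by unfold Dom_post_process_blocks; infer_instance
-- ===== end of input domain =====

-- B replaces A's accumulate-current-sub-block loop by an index-computing pass plus a slicing pass per block (different decomposition, same cost).


-- ===== PORT A =====

-- the keyword list of A's first condition
def pvKeywords : List String := ["example", "usage", "test", "check"]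

-- one iteration of A's `for line in lines` loop; state = (sub_blocks, current_sub_block)
def pvStepA (st : List String × List String) (line : String) : List String × List String :=
  let subs := st.1
  let cur := st.2
  let stripped := PySem.Str.strip line
  if PySem.Str.startswith stripped "#"
      && pvKeywords.any (fun k => PySem.Str.isIn k (PySem.Str.lower stripped))
      && !cur.isEmpty then
    let t := PySem.Str.strip (PySem.Str.join "\n" cur)
    (if t = "" then subs else subs ++ [t], [line])
  else if PySem.Str.startswith stripped "if "
      && PySem.Str.isIn "is_prime" stripped
      && !cur.isEmpty
      && !(cur.any (fun cb => PySem.Str.isIn "if " cb)) then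
    let t := PySem.Str.strip (PySem.Str.join "\n" cur)
    (if t = "" then subs else subs ++ [t], [line])
  else
    (subs, cur ++ [line])

-- the body of A's `for block in blocks` loop up to the computed sub_blocks
def pvSubBlocksA (block : String) : List String :=
  let lines := (PySem.Str.split? block "\n").getD []
  let st := lines.foldl pvStepA ([], [])
  if !st.2.isEmpty then
    let t := PySem.Str.strip (PySem.Str.join "\n" st.2)
    if t = "" then st.1 else st.1 ++ [t]
  else st.1

def post_process_blocks (blocks : List String) : List String :=
  let refined := blocks.foldl (fun acc block =>
    let subs := pvSubBlocksA block
    if subs.length > 1 then acc ++ subs else acc ++ [block]) []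
  refined.filter (fun b => PySem.Str.strip b != "")

-- ===== PORT B =====

-- pass 1 step: state = (splits, seg_len, has_if), input = (i, line) from enumerate
def pvStepB (st : List Int × Int × Bool) (p : Int × String) : List Int × Int × Bool :=
  let splits := st.1
  let segLen := st.2.1
  let hasIf := st.2.2
  let stripped := PySem.Str.strip p.2
  if segLen > 0
      && ((PySem.Str.startswith stripped "#"
            && pvKeywords.any (fun k => PySem.Str.isIn k (PySem.Str.lower stripped)))
          || (PySem.Str.startswith stripped "if "
                && PySem.Str.isIn "is_prime" stripped
                && !hasIf)) then
    (splits ++ [p.1], 1, PySem.Str.isIn "if " p.2)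
  else
    (splits, segLen + 1, hasIf || PySem.Str.isIn "if " p.2)

-- pass 2 step: append the stripped join of lines[s:e] when non-empty
def pvStepSeg (lines : List String) (acc : List String) (se : Int × Int) : List String :=
  let t := PySem.Str.strip (PySem.Str.join "\n" (PySem.List.slice lines (some se.1) (some se.2)))
  if t = "" then acc else acc ++ [t]

-- the body of B's `for block in blocks` loop up to the computed sub_blocks
def pvSubBlocksB (block : String) : List String :=
  let lines := (PySem.Str.split? block "\n").getD []
  let n : Int := lines.length
  let st := (PySem.List.enumerate lines 0).foldl pvStepB ([0], 0, false)
  let splits := st.1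
  (splits.zip (splits.drop 1 ++ [n])).foldl (pvStepSeg lines) []

def post_process_blocks_alt (blocks : List String) : List String :=
  let refined := blocks.foldl (fun acc block =>
    let subs := pvSubBlocksB block
    if subs.length > 1 then acc ++ subs else acc ++ [block]) []
  refined.filter (fun b => PySem.Str.strip b != "")

-- ===== PRECONDITION & SPEC =====
def Spec_post_process_blocks (blocks : List String) (out : List String) : Prop := out = post_process_blocks_alt blocks
instance (blocks : List String) (out : List String) : Decidable (Spec_post_process_blocks blocks out) := by unfold Spec_post_process_blocks; infer_instance

-- ===== CLAIM (what is proved, stated in full; the proofs are below) =====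
def Claim_equal_post_process_blocks : Prop := ∀ (blocks : List String), Dom_post_process_blocks blocks → Spec_post_process_blocks blocks (post_process_blocks blocks)

-- ===== LEMMAS AND PROOFS =====

-- helper views of the two loop bodies (proof-side)
def pvFinishA (st : List String × List String) : List String :=
  if !st.2.isEmpty then
    let t := PySem.Str.strip (PySem.Str.join "\n" st.2)
    if t = "" then st.1 else st.1 ++ [t]
  else st.1

def pvPass2 (lines : List String) (splits : List Int) : List String :=
  (splits.zip (splits.drop 1 ++ [(lines.length : Int)])).foldl (pvStepSeg lines) []

-- zipping a non-empty list with its own tail extended by x appends the (last, x) pair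
lemma pv_zip_tail_append (l : List Int) (s x : Int) (h : l.getLast? = some s) :
    l.zip (l.drop 1 ++ [x]) = l.zip (l.drop 1) ++ [(s, x)] := by
  induction l with
  | nil => simp at h
  | cons a t ih =>
    cases t with
    | nil => simp at h; simp [h]
    | cons b u =>
      have h' : (b :: u).getLast? = some s := by
        simpa [List.getLast?_cons_cons] using h
      simp only [List.drop_one, List.tail_cons, List.zip_cons_cons, List.cons_append]
      have := ih h'
      simp only [List.drop_one, List.tail_cons] at this
      simp [this]

-- appending a new split index appends the (last, new) segment pair
lemma pv_zip_snoc (l : List Int) (s x : Int) (h : l.getLast? = some s) :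
    (l ++ [x]).zip ((l ++ [x]).drop 1) = l.zip (l.drop 1) ++ [(s, x)] := by
  induction l with
  | nil => simp at h
  | cons a t ih =>
    cases t with
    | nil => simp at h; simp [h]
    | cons b u =>
      have h' : (b :: u).getLast? = some s := by
        simpa [List.getLast?_cons_cons] using h
      have := ih h'
      simp only [List.cons_append, List.drop_one, List.tail_cons, List.zip_cons_cons] at this ⊢
      simp [this]

-- the final tail step of A equals applying pvStepSeg at (s, lines.length)
lemma pv_finish (lines subs : List String) (s : Nat) :
    pvFinishA (subs, (lines.drop s).take (lines.length - s))
    = pvStepSeg lines subs ((s : Int), (lines.length : Int)) := by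
  have hslice : PySem.List.slice lines (some (s : Int)) (some (lines.length : Int))
      = (lines.drop s).take (lines.length - s) := by
    exact_mod_cast PySem.List.slice_natCast lines s lines.length
  have hcur : (lines.drop s).take (lines.length - s) = lines.drop s := by
    apply List.take_of_length_le; simp
  by_cases hemp : lines.drop s = []
  · rw [pvFinishA, pvStepSeg, hslice, hcur, hemp]
    simp [PySem.Str.join]
    decide
  · rw [pvFinishA, pvStepSeg, hslice, hcur]
    simp [hemp]

-- main loop invariant: running A's remaining loop + tail equals B's remaining pass 1 + pass 2
lemma pv_inner (lines : List String) (rest : List String) (i s : Nat)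
    (splits : List Int) (subs : List String) (hasIf : Bool)
    (hrest : rest = lines.drop i) (hile : i ≤ lines.length) (hsi : s ≤ i)
    (hlast : splits.getLast? = some ((s : Nat) : Int))
    (hsubs : (splits.zip (splits.drop 1)).foldl (pvStepSeg lines) [] = subs)
    (hhas : hasIf = ((lines.drop s).take (i - s)).any (fun l => PySem.Str.isIn "if " l)) :
    pvFinishA (rest.foldl pvStepA (subs, (lines.drop s).take (i - s)))
    = pvPass2 lines
        ((PySem.List.enumerate rest (i : Int)).foldl pvStepB
          (splits, ((i - s : Nat) : Int), hasIf)).1 := by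
  induction rest generalizing i s splits subs hasIf with
  | nil =>
    have hlen : i = lines.length := by
      have := congrArg List.length hrest; simp at this; omega
    subst hlen
    simp only [List.foldl_nil, PySem.List.enumerate_nil]
    rw [pvPass2, pv_zip_tail_append _ _ _ hlast, List.foldl_append, hsubs]
    simpa using pv_finish lines subs s
  | cons line rest' ih =>
    have hi : i < lines.length := by
      by_contra hc
      have hdrop : lines.drop i = [] := List.drop_eq_nil_of_le (by omega)
      rw [hdrop] at hrest; simp at hrest
    have hget : lines.drop i = line :: rest' := hrest.symm
    have hrest' : rest' = lines.drop (i + 1) := by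
      have := congrArg List.tail hget
      simpa [List.tail_drop] using this.symm
    have hcur1 : (lines.drop s).take (i + 1 - s) = (lines.drop s).take (i - s) ++ [line] := by
      have h1 : i + 1 - s = (i - s) + 1 := by omega
      rw [h1, List.take_add]
      congr 1
      rw [List.drop_drop]
      have h2 : s + (i - s) = i := by omega
      rw [h2, hget]
      rfl
    have hclen : ((lines.drop s).take (i - s)).length = i - s := by
      simp; omega
    rw [PySem.List.enumerate_cons]
    simp only [List.foldl_cons]
    rw [show ((i : Int) + 1) = ((i + 1 : Nat) : Int) by push_cast; ring]
    by_cases hsieq : s = i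
    · -- current segment empty: both sides append
      have hcur0 : (lines.drop s).take (i - s) = [] := by
        subst hsieq; simp
      have hstepA : pvStepA (subs, (lines.drop s).take (i - s)) line
          = (subs, (lines.drop s).take (i - s) ++ [line]) := by
        rw [hcur0]; simp [pvStepA]
      have hstepB : pvStepB (splits, ((i - s : Nat) : Int), hasIf) ((i : Int), line)
          = (splits, ((i - s : Nat) : Int) + 1, hasIf || PySem.Str.isIn "if " line) := by
        have : ((i - s : Nat) : Int) = 0 := by subst hsieq; simp
        rw [this]; simp [pvStepB]
      rw [hstepA, hstepB]
      have hseg1 : ((i - s : Nat) : Int) + 1 = ((i + 1 - s : Nat) : Int) := by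
        subst hsieq; simp
      rw [hseg1, ← hcur1]
      exact ih (i + 1) s splits subs _ hrest' (by omega) (by omega) hlast hsubs
        (by rw [hcur1, hcur0, hhas, hcur0]; simp)
    · have hslt : s < i := lt_of_le_of_ne hsi hsieq
      have hcne : ((lines.drop s).take (i - s)).isEmpty = false := by
        rw [List.isEmpty_eq_false_iff, ← List.length_pos_iff, hclen]; omega
      have hsegpos : (0 : Int) < ((i - s : Nat) : Int) := by
        have : 0 < i - s := by omega
        exact_mod_cast this
      set stripped := PySem.Str.strip line with hstr
      set a := PySem.Str.startswith stripped "#"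
          && pvKeywords.any (fun k => PySem.Str.isIn k (PySem.Str.lower stripped)) with ha
      set b := PySem.Str.startswith stripped "if " && PySem.Str.isIn "is_prime" stripped with hb
      set anyIf := ((lines.drop s).take (i - s)).any (fun cb => PySem.Str.isIn "if " cb) with hany
      by_cases hc : (a || (b && !anyIf)) = true
      · -- split step on both sides
        have hstepA : pvStepA (subs, (lines.drop s).take (i - s)) line
            = (if PySem.Str.strip (PySem.Str.join "\n" ((lines.drop s).take (i - s))) = ""
                then subs
                else subs ++ [PySem.Str.strip (PySem.Str.join "\n" ((lines.drop s).take (i - s)))],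
               [line]) := by
          simp only [pvStepA, ← hstr, ← ha, ← hb, ← hany, hcne]
          rcases Bool.or_eq_true_iff.mp hc with h' | h'
          · simp [h']
          · have hb' : b = true := (Bool.and_eq_true_iff.mp h').1
            have hany' : anyIf = false := by
              have := (Bool.and_eq_true_iff.mp h').2; simpa using this
            cases hA : a <;> simp [hb', hany']
        have hstepB : pvStepB (splits, ((i - s : Nat) : Int), hasIf) ((i : Int), line)
            = (splits ++ [(i : Int)], 1, PySem.Str.isIn "if " line) := by
          simp only [pvStepB, ← hstr, ← ha, ← hb]
          rw [← hhas] at hc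
          simp [hc, hslt]
        rw [hstepA, hstepB]
        have hone : (1 : Int) = ((i + 1 - i : Nat) : Int) := by simp
        rw [hone]
        have hline1 : [line] = (lines.drop i).take (i + 1 - i) := by
          rw [hget]; simp
        rw [hline1]
        refine ih (i + 1) i (splits ++ [(i : Int)]) _ _ hrest' (by omega) (by omega)
          (by simp) ?_ (by rw [← hline1]; simp)
        -- new subs invariant
        rw [pv_zip_snoc _ ((s : Nat) : Int) ((i : Nat) : Int) hlast, List.foldl_append, hsubs]
        simp only [List.foldl_cons, List.foldl_nil, pvStepSeg]
        have hslice : PySem.List.slice lines (some ((s : Nat) : Int)) (some ((i : Nat) : Int))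
            = (lines.drop s).take (i - s) := by
          exact_mod_cast PySem.List.slice_natCast lines s i
        rw [hslice]
      · -- append step on both sides
        have hc' : (a || (b && !anyIf)) = false := by
          cases h : (a || (b && !anyIf)) with
          | true => exact absurd h hc
          | false => rfl
        have hA : a = false := (Bool.or_eq_false_iff.mp hc').1
        have hstepA : pvStepA (subs, (lines.drop s).take (i - s)) line
            = (subs, (lines.drop s).take (i - s) ++ [line]) := by
          simp only [pvStepA, ← hstr, ← ha, ← hb, ← hany, hcne]
          rcases Bool.or_eq_false_iff.mp hc' with ⟨h1, h2⟩
          cases hB : b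
          · simp [hA]
          · have : anyIf = true := by
              rw [hB] at h2; simpa using h2
            simp [hA, this]
        have hstepB : pvStepB (splits, ((i - s : Nat) : Int), hasIf) ((i : Int), line)
            = (splits, ((i - s : Nat) : Int) + 1, hasIf || PySem.Str.isIn "if " line) := by
          simp only [pvStepB, ← hstr, ← ha, ← hb]
          rw [← hhas] at hc'
          simp [hc']
        rw [hstepA, hstepB]
        have hseg1 : ((i - s : Nat) : Int) + 1 = ((i + 1 - s : Nat) : Int) := by
          push_cast [Nat.sub_add_comm hsi]; omega
        rw [hseg1, ← hcur1]
        refine ih (i + 1) s splits subs _ hrest' (by omega) (by omega) hlast hsubs ?_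
        rw [hcur1, List.any_append, hhas, ← hany]
        simp

-- per-block equality of the two loop bodies
lemma pv_subBlocks_eq (block : String) : pvSubBlocksA block = pvSubBlocksB block := by
  have := pv_inner ((PySem.Str.split? block "\n").getD []) ((PySem.Str.split? block "\n").getD [])
    0 0 [0] [] false (by simp) (by simp) (by omega) (by simp) (by simp) (by simp)
  simpa [pvSubBlocksA, pvSubBlocksB, pvFinishA, pvPass2] using this

-- ===== VERDICT (by name: the statement is the Claim_ definition above) =====
theorem post_process_blocks_spec : Claim_equal_post_process_blocks := by
  intro blocks _
  unfold Spec_post_process_blocks post_process_blocks post_process_blocks_alt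
  simp only [pv_subBlocks_eq]
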